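-- pv_equiv track=rewrite | github.com/saulrichardson/dating-agent | automation_service/mobile/live_hinge_agent.py | _classify_hinge_screen
-- ===== SOURCE A (Python) =====
-- def _classify_hinge_screen(strings: list[str]) -> str:
--     lowered = [s.lower() for s in strings]
--     if any("out of free likes" in s for s in lowered):
--         return "hinge_like_paywall"
--     if (
--         (any("close sheet" in s for s in lowered) and any("rose" in s for s in lowered))
--         or any("catch their eye by sending a rose" in s for s in lowered)
--     ):
--         return "hinge_overlay_rose_sheet"
--     if any("no matches yet" in s for s in lowered):
--         return "hinge_matches_empty"
--     if any("when a like is mutual" in s for s in lowered):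
--         return "hinge_matches_empty"
--     discover_like_signal = any(s.startswith("like ") for s in lowered) or any(
--         "send like with message" in s for s in lowered
--     )
--     discover_pass_signal = any(s.startswith("skip ") or s == "skip" for s in lowered) or any(
--         "undo the previous pass rating" in s for s in lowered
--     )
--     discover_composer_signal = any(
--         ("edit comment" in s) or ("add a comment" in s) or ("send like with message" in s) for s in lowered
--     )
--     if (discover_like_signal and discover_pass_signal) or discover_composer_signal:
--         return "hinge_discover_card"
--     if any("type a message" in s for s in lowered) or ("send" in lowered):
--         return "hinge_chat"
--     if "matches" in lowered and "discover" in lowered: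
--         return "hinge_tab_shell"
--     return "hinge_unknown"
-- ===== SOURCE B (Python) =====
-- def _classify_hinge_screen(strings: list[str]) -> str:
--     # Alternative decomposition: lower each string once in a single pass and accumulate boolean flags,
--     # then dispatch through the same priority cascade.
--     paywall = close_sheet = rose = catch_rose = no_matches = like_mutual = False
--     like_prefix = send_with_msg = skip_sig = undo_pass = composer = False
--     type_message = eq_send = eq_matches = eq_discover = False
--     for raw in strings:
--         s = raw.lower()
--         paywall = paywall or "out of free likes" in s
--         close_sheet = close_sheet or "close sheet" in s
--         rose = rose or "rose" in s
--         catch_rose = catch_rose or "catch their eye by sending a rose" in s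
--         no_matches = no_matches or "no matches yet" in s
--         like_mutual = like_mutual or "when a like is mutual" in s
--         like_prefix = like_prefix or s.startswith("like ")
--         send_with_msg = send_with_msg or "send like with message" in s
--         skip_sig = skip_sig or s.startswith("skip ") or s == "skip"
--         undo_pass = undo_pass or "undo the previous pass rating" in s
--         composer = composer or "edit comment" in s or "add a comment" in s
--         type_message = type_message or "type a message" in s
--         eq_send = eq_send or s == "send"
--         eq_matches = eq_matches or s == "matches"
--         eq_discover = eq_discover or s == "discover"
--     if paywall:
--         return "hinge_like_paywall"
--     if (close_sheet and rose) or catch_rose: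
--         return "hinge_overlay_rose_sheet"
--     if no_matches:
--         return "hinge_matches_empty"
--     if like_mutual:
--         return "hinge_matches_empty"
--     if ((like_prefix or send_with_msg) and (skip_sig or undo_pass)) or (composer or send_with_msg):
--         return "hinge_discover_card"
--     if type_message or eq_send:
--         return "hinge_chat"
--     if eq_matches and eq_discover:
--         return "hinge_tab_shell"
--     return "hinge_unknown"
-- ===== Notes on version B (the rewrite author's own statement) =====
-- stated objective: alternative
-- what changed: Replaces A's ~13 separate scans of the lowered list (one per any/membership test) with a single pass that lowers each string once and accumulates fifteen boolean flags, then runs the same priority cascade on the flags (measured ~1.4x, below the 1.5x faster threshold).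
import Mathlib
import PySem

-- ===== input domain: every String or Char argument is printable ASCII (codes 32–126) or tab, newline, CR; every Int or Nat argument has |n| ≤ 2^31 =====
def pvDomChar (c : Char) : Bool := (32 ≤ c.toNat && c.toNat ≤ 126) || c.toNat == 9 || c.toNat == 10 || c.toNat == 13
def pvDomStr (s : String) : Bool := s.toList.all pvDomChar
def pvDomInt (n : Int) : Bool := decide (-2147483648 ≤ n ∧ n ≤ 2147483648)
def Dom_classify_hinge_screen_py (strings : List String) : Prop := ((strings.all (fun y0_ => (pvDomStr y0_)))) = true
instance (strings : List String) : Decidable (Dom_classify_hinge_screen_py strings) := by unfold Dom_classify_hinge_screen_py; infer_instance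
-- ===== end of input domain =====

-- B replaces A's ~13 separate scans of the lowered list by ONE pass accumulating
-- boolean flags, followed by the same priority cascade (objective: alternative decomposition).

-- ===== PORT A =====
-- literal transliteration: build `lowered`, then repeated `any`/membership scans in A's branch order
def classify_hinge_screen_py (strings : List String) : String :=
  let lowered := strings.map PySem.Str.lower
  if lowered.any (fun s => PySem.Str.isIn "out of free likes" s) then "hinge_like_paywall"
  else if (lowered.any (fun s => PySem.Str.isIn "close sheet" s) &&
           lowered.any (fun s => PySem.Str.isIn "rose" s)) ||
          lowered.any (fun s => PySem.Str.isIn "catch their eye by sending a rose" s) then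
    "hinge_overlay_rose_sheet"
  else if lowered.any (fun s => PySem.Str.isIn "no matches yet" s) then "hinge_matches_empty"
  else if lowered.any (fun s => PySem.Str.isIn "when a like is mutual" s) then "hinge_matches_empty"
  else
    let discover_like_signal := lowered.any (fun s => PySem.Str.startswith s "like ") ||
      lowered.any (fun s => PySem.Str.isIn "send like with message" s)
    let discover_pass_signal := lowered.any (fun s => PySem.Str.startswith s "skip " || s == "skip") ||
      lowered.any (fun s => PySem.Str.isIn "undo the previous pass rating" s)
    let discover_composer_signal := lowered.any (fun s =>
      PySem.Str.isIn "edit comment" s || PySem.Str.isIn "add a comment" s ||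
      PySem.Str.isIn "send like with message" s)
    if (discover_like_signal && discover_pass_signal) || discover_composer_signal then
      "hinge_discover_card"
    else if lowered.any (fun s => PySem.Str.isIn "type a message" s) || lowered.contains "send" then
      "hinge_chat"
    else if lowered.contains "matches" && lowered.contains "discover" then "hinge_tab_shell"
    else "hinge_unknown"

-- ===== PORT B =====
structure HingeFlags where
  paywall : Bool
  close_sheet : Bool
  rose : Bool
  catch_rose : Bool
  no_matches : Bool
  like_mutual : Bool
  like_prefix : Bool
  send_with_msg : Bool
  skip_sig : Bool
  undo_pass : Bool
  composer : Bool
  type_message : Bool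
  eq_send : Bool
  eq_matches : Bool
  eq_discover : Bool
deriving DecidableEq, Repr

def hingeStep (f : HingeFlags) (raw : String) : HingeFlags :=
  let s := PySem.Str.lower raw
  { paywall := f.paywall || PySem.Str.isIn "out of free likes" s,
    close_sheet := f.close_sheet || PySem.Str.isIn "close sheet" s,
    rose := f.rose || PySem.Str.isIn "rose" s,
    catch_rose := f.catch_rose || PySem.Str.isIn "catch their eye by sending a rose" s,
    no_matches := f.no_matches || PySem.Str.isIn "no matches yet" s,
    like_mutual := f.like_mutual || PySem.Str.isIn "when a like is mutual" s,
    like_prefix := f.like_prefix || PySem.Str.startswith s "like ",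
    send_with_msg := f.send_with_msg || PySem.Str.isIn "send like with message" s,
    skip_sig := f.skip_sig || PySem.Str.startswith s "skip " || s == "skip",
    undo_pass := f.undo_pass || PySem.Str.isIn "undo the previous pass rating" s,
    composer := f.composer || PySem.Str.isIn "edit comment" s || PySem.Str.isIn "add a comment" s,
    type_message := f.type_message || PySem.Str.isIn "type a message" s,
    eq_send := f.eq_send || s == "send",
    eq_matches := f.eq_matches || s == "matches",
    eq_discover := f.eq_discover || s == "discover" }

def hingeInit : HingeFlags :=
  ⟨false, false, false, false, false, false, false, false, false, false, false, false, false, false, false⟩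

def classify_hinge_screen_py_alt (strings : List String) : String :=
  let f := strings.foldl hingeStep hingeInit
  if f.paywall then "hinge_like_paywall"
  else if (f.close_sheet && f.rose) || f.catch_rose then "hinge_overlay_rose_sheet"
  else if f.no_matches then "hinge_matches_empty"
  else if f.like_mutual then "hinge_matches_empty"
  else if ((f.like_prefix || f.send_with_msg) && (f.skip_sig || f.undo_pass)) ||
          (f.composer || f.send_with_msg) then "hinge_discover_card"
  else if f.type_message || f.eq_send then "hinge_chat"
  else if f.eq_matches && f.eq_discover then "hinge_tab_shell"
  else "hinge_unknown"

-- ===== PRECONDITION & SPEC =====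
def Spec_classify_hinge_screen_py (strings : List String) (out : String) : Prop := out = classify_hinge_screen_py_alt strings
instance (strings : List String) (out : String) : Decidable (Spec_classify_hinge_screen_py strings out) := by unfold Spec_classify_hinge_screen_py; infer_instance

-- ===== CLAIM (what is proved, stated in full; the proofs are below) =====
def Claim_equal_classify_hinge_screen_py : Prop := ∀ (strings : List String), Dom_classify_hinge_screen_py strings → Spec_classify_hinge_screen_py strings (classify_hinge_screen_py strings)

-- ===== LEMMAS AND PROOFS =====

-- each flag of the fold is the corresponding `any` over the lowered strings
theorem hinge_fold_eq (l : List String) (f : HingeFlags) :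
    l.foldl hingeStep f =
    ⟨f.paywall || l.any (fun r => PySem.Str.isIn "out of free likes" (PySem.Str.lower r)),
     f.close_sheet || l.any (fun r => PySem.Str.isIn "close sheet" (PySem.Str.lower r)),
     f.rose || l.any (fun r => PySem.Str.isIn "rose" (PySem.Str.lower r)),
     f.catch_rose || l.any (fun r => PySem.Str.isIn "catch their eye by sending a rose" (PySem.Str.lower r)),
     f.no_matches || l.any (fun r => PySem.Str.isIn "no matches yet" (PySem.Str.lower r)),
     f.like_mutual || l.any (fun r => PySem.Str.isIn "when a like is mutual" (PySem.Str.lower r)),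
     f.like_prefix || l.any (fun r => PySem.Str.startswith (PySem.Str.lower r) "like "),
     f.send_with_msg || l.any (fun r => PySem.Str.isIn "send like with message" (PySem.Str.lower r)),
     f.skip_sig || l.any (fun r => PySem.Str.startswith (PySem.Str.lower r) "skip " || PySem.Str.lower r == "skip"),
     f.undo_pass || l.any (fun r => PySem.Str.isIn "undo the previous pass rating" (PySem.Str.lower r)),
     f.composer || l.any (fun r => PySem.Str.isIn "edit comment" (PySem.Str.lower r) || PySem.Str.isIn "add a comment" (PySem.Str.lower r)),
     f.type_message || l.any (fun r => PySem.Str.isIn "type a message" (PySem.Str.lower r)),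
     f.eq_send || l.any (fun r => PySem.Str.lower r == "send"),
     f.eq_matches || l.any (fun r => PySem.Str.lower r == "matches"),
     f.eq_discover || l.any (fun r => PySem.Str.lower r == "discover")⟩ := by
  induction l generalizing f with
  | nil => simp
  | cons x xs ih =>
    simp only [List.foldl_cons, List.any_cons, ih, hingeStep]
    simp [Bool.or_assoc]

-- ===== VERDICT (by name: the statement is the Claim_ definition above) =====
theorem classify_hinge_screen_py_spec : Claim_equal_classify_hinge_screen_py := by
  intro strings _
  show _ = _
  unfold classify_hinge_screen_py classify_hinge_screen_py_alt
  simp only [hinge_fold_eq, hingeInit, Bool.false_or, List.any_map, Function.comp_def,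
    List.contains_eq_mem, List.mem_map, List.any_eq_true, Bool.or_eq_true, Bool.and_eq_true,
    beq_iff_eq, decide_eq_true_eq, and_or_left, exists_or, or_assoc]
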